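-- pv_equiv track=rewrite | github.com/e-kirkland/capman | scripts/api_calls.py | get_roster_id
-- ===== SOURCE A (Python) =====
-- def get_roster_id(text):
--
--     # Cleaning text
--     text = text.lower().strip()
--
--     lookupdict = {
--         1: ["eddie", "kirkland", "process", "trust"],
--         2: ["cory", "draper", "tampa", "badger"],
--         3: ["will", "fortanbary", "essendon", "bombers"],
--         4: ["jeff", "herbst", "kickers", "qb"],
--         5: ["isaac", "wesley", "cleveland", "steamers"],
--         6: ["nick", "nicholas", "bazemore", "tech", "gtech", "ga"],
--         7: ["ryan", "atkinson", "rules", "sucks"],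
--         8: ["chris", "kirkland", "acworth", "eagles", "lame"],
--         9: ["alex", "aghoian", "beats", "ray"],
--         10: ["jeremy", "hess", "big", "home"],
--     }
--
--     roster_id = "9"
--
--     for n in range(1, 11):
--         id = n
--         array = lookupdict[n]
--         for word in array:
--             if word in text:
--                 roster_id = str(id)
--                 break
--             else:
--                 pass
--
--     return str(roster_id)
-- ===== SOURCE B (Python) =====
-- def get_roster_id(text):
--
--     # Cleaning text
--     text = text.lower().strip()
--
--     lookupdict = {
--         1: ["eddie", "kirkland", "process", "trust"],
--         2: ["cory", "draper", "tampa", "badger"],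
--         3: ["will", "fortanbary", "essendon", "bombers"],
--         4: ["jeff", "herbst", "kickers", "qb"],
--         5: ["isaac", "wesley", "cleveland", "steamers"],
--         6: ["nick", "nicholas", "bazemore", "tech", "gtech", "ga"],
--         7: ["ryan", "atkinson", "rules", "sucks"],
--         8: ["chris", "kirkland", "acworth", "eagles", "lame"],
--         9: ["alex", "aghoian", "beats", "ray"],
--         10: ["jeremy", "hess", "big", "home"],
--     }
--
--     # Invert the table once: keyword -> highest roster id owning it
--     kw2id = {}
--     for rid, kws in lookupdict.items():
--         for kw in kws:
--             kw2id[kw] = max(kw2id.get(kw, rid), rid)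
--     lengths = sorted({len(kw) for kw in kw2id})
--
--     # Scan the TEXT: every substring of a keyword length is a hash lookup
--     best = None
--     for i in range(len(text)):
--         for L in lengths:
--             rid = kw2id.get(text[i:i + L])
--             if rid is not None:
--                 best = rid if best is None else max(best, rid)
--
--     return str(best if best is not None else 9)
-- ===== Notes on version B (the rewrite author's own statement) =====
-- stated objective: alternative
-- what changed: Instead of A's scan over the keyword table doing a substring search per keyword, B inverts the table once into a keyword->highest-id dict and scans the text's positions, hash-looking-up each substring of a keyword length and keeping the running max (default 9).
import Mathlib
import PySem

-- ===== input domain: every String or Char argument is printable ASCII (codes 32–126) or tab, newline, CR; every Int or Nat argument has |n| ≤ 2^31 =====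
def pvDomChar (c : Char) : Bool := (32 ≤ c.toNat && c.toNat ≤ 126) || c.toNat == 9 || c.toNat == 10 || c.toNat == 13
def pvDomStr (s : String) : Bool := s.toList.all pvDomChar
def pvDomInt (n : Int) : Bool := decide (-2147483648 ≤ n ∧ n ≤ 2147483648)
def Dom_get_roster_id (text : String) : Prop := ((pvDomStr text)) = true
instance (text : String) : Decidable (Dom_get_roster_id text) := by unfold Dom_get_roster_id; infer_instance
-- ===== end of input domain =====

-- B inverts the table once (keyword -> highest owning id) and then scans the TEXT's substrings with
-- dictionary lookups, instead of A's scan over the keyword table with substring searches (alternative; same result).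

-- ===== PORT A =====
-- the dict literal from A
def pvLookup : PySem.Dict Int (List String) :=
  PySem.Dict.ofList
  [(1, ["eddie", "kirkland", "process", "trust"]),
   (2, ["cory", "draper", "tampa", "badger"]),
   (3, ["will", "fortanbary", "essendon", "bombers"]),
   (4, ["jeff", "herbst", "kickers", "qb"]),
   (5, ["isaac", "wesley", "cleveland", "steamers"]),
   (6, ["nick", "nicholas", "bazemore", "tech", "gtech", "ga"]),
   (7, ["ryan", "atkinson", "rules", "sucks"]),
   (8, ["chris", "kirkland", "acworth", "eagles", "lame"]),
   (9, ["alex", "aghoian", "beats", "ray"]),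
   (10, ["jeremy", "hess", "big", "home"])]

-- inner loop: 'for word in array: if word in text: roster_id = str(id); break; else: pass'
def pvInner (t : String) (id : Int) (array : List String) (roster : String) : String :=
  match array with
  | [] => roster
  | w :: ws => if PySem.Str.isIn w t then PySem.Int.toStr id else pvInner t id ws roster

def get_roster_id (text : String) : String :=
  -- text = text.lower().strip(); lookupdict[n] always succeeds (keys 1..10 present), .getD [] totalizes the lookup
  (PySem.List.pyRange 1 11 1).foldl
    (fun roster n =>
      pvInner (PySem.Str.strip (PySem.Str.lower text)) n
        ((PySem.Dict.get? pvLookup n).getD []) roster) "9"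

-- ===== PORT B =====
-- the same table as a plain items list (B iterates lookupdict.items())
def pvItems : List (Int × List String) :=
  [(1, ["eddie", "kirkland", "process", "trust"]),
   (2, ["cory", "draper", "tampa", "badger"]),
   (3, ["will", "fortanbary", "essendon", "bombers"]),
   (4, ["jeff", "herbst", "kickers", "qb"]),
   (5, ["isaac", "wesley", "cleveland", "steamers"]),
   (6, ["nick", "nicholas", "bazemore", "tech", "gtech", "ga"]),
   (7, ["ryan", "atkinson", "rules", "sucks"]),
   (8, ["chris", "kirkland", "acworth", "eagles", "lame"]),
   (9, ["alex", "aghoian", "beats", "ray"]),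
   (10, ["jeremy", "hess", "big", "home"])]

-- kw2id = {}; for rid, kws in lookupdict.items(): for kw in kws: kw2id[kw] = max(kw2id.get(kw, rid), rid)
def pvKw2Id : PySem.Dict String Int :=
  pvItems.foldl
    (fun d p => p.2.foldl
      (fun d kw => PySem.Dict.insert d kw (max (PySem.Dict.getD d kw p.1) p.1)) d)
    PySem.Dict.empty

-- lengths = sorted({len(kw) for kw in kw2id})
def pvLengths : List Int :=
  PySem.List.sorted
    (PySem.Set.ofList ((PySem.Dict.keys pvKw2Id).map (fun kw => PySem.Str.len kw)))
    (fun x => x) false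

def get_roster_id_alt (text : String) : String :=
  -- text = text.lower().strip(); best = None
  -- for i in range(len(text)):
  --   for L in lengths:
  --     rid = kw2id.get(text[i:i+L])
  --     if rid is not None: best = rid if best is None else max(best, rid)
  -- return str(best if best is not None else 9)
  PySem.Int.toStr
    (((PySem.List.pyRange 0 (PySem.Str.len (PySem.Str.strip (PySem.Str.lower text))) 1).foldl
        (fun best i =>
          pvLengths.foldl
            (fun best L =>
              match PySem.Dict.get? pvKw2Id
                  (PySem.Str.slice (PySem.Str.strip (PySem.Str.lower text)) (some i) (some (i + L))) with
              | none => best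
              | some rid => some (match best with | none => rid | some m => max m rid))
            best)
        none).getD 9)

-- ===== PRECONDITION & SPEC =====
def Spec_get_roster_id (text : String) (out : String) : Prop := out = get_roster_id_alt text
instance (text : String) (out : String) : Decidable (Spec_get_roster_id text out) := by unfold Spec_get_roster_id; infer_instance

-- ===== CLAIM (what is proved, stated in full; the proofs are below) =====
def Claim_equal_get_roster_id : Prop := ∀ (text : String), Dom_get_roster_id text → Spec_get_roster_id text (get_roster_id text)

-- ===== LEMMAS AND PROOFS =====

-- the candidate id lists both sides reduce to (t is the cleaned text)
def pvCandsA (t : String) : List Int :=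
  pvItems.flatMap (fun p => p.2.filterMap
    (fun kw => if PySem.Str.isIn kw t then some p.1 else none))

def pvCandsB (t : String) : List Int :=
  (PySem.List.pyRange 0 (PySem.Str.len t) 1).flatMap (fun i =>
    pvLengths.filterMap (fun L =>
      PySem.Dict.get? pvKw2Id (PySem.Str.slice t (some i) (some (i + L)))))

-- ---- A side: the last-wins ascending loop is the max of its candidates ----

theorem pvInner_eq (t : String) (id : Int) (array : List String) (roster : String) :
    pvInner t id array roster =
      if array.any (fun w => PySem.Str.isIn w t) then PySem.Int.toStr id else roster := by
  induction array with
  | nil => simp [pvInner]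
  | cons w ws ih =>
    show (if PySem.Str.isIn w t then PySem.Int.toStr id else pvInner t id ws roster) = _
    rw [List.any_cons, ih]
    cases PySem.Str.isIn w t <;> simp

theorem pv_filterMap_const (t : String) (n : Int) (ws : List String) :
    ws.filterMap (fun kw => if PySem.Str.isIn kw t then some n else none) =
      List.replicate (ws.countP (fun w => PySem.Str.isIn w t)) n := by
  induction ws with
  | nil => simp
  | cons w ws ih =>
    rw [List.filterMap_cons, List.countP_cons]
    cases h : PySem.Str.isIn w t <;> simp only [ih] <;> simp [List.replicate_succ]

theorem pv_max?_replicate_append (k : Nat) (n : Int) (rest : List Int) :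
    PySem.List.max? (List.replicate k n ++ rest) (fun x => x) =
      if k = 0 then PySem.List.max? rest (fun x => x)
      else some (rest.foldl max n) := by
  rcases Nat.eq_zero_or_pos k with hk | hk
  · simp [hk]
  · obtain ⟨k', rfl⟩ : ∃ k', k = k' + 1 := ⟨k - 1, by omega⟩
    simp only [List.replicate_succ, List.cons_append, PySem.List.max?_id_cons,
      Nat.succ_ne_zero, if_false]
    induction k' with
    | zero => simp
    | succ k'' ih => simpa [List.replicate_succ] using ih (by omega)

theorem pv_countP_zero_iff_any (t : String) (ws : List String) :
    (ws.countP (fun w => PySem.Str.isIn w t) = 0) ↔ (ws.any (fun w => PySem.Str.isIn w t) = false) := by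
  rw [List.countP_eq_zero, List.any_eq_false]

theorem pv_mem_cands (t : String) (L : List (Int × List String)) (m : Int)
    (hm : m ∈ L.flatMap (fun p => p.2.filterMap
        (fun kw => if PySem.Str.isIn kw t then some p.1 else none))) :
    ∃ q ∈ L, m = q.1 := by
  rcases List.mem_flatMap.mp hm with ⟨p, hp, hmp⟩
  rcases List.mem_filterMap.mp hmp with ⟨kw, _, hkw⟩
  refine ⟨p, hp, ?_⟩
  cases h : PySem.Str.isIn kw t
  · rw [h] at hkw; simp at hkw
  · rw [h] at hkw; simp at hkw; exact hkw.symm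

-- A's overwrite loop over groups with ascending ids computes the max matching id
theorem pv_last_eq_max (t : String) (L : List (Int × List String)) (r0 : String)
    (hs : List.Pairwise (fun a b => a.1 ≤ b.1) L) :
    L.foldl (fun r p => if p.2.any (fun w => PySem.Str.isIn w t) then PySem.Int.toStr p.1 else r) r0 =
      ((PySem.List.max? (L.flatMap (fun p => p.2.filterMap
          (fun kw => if PySem.Str.isIn kw t then some p.1 else none))) (fun x => x)).map
        PySem.Int.toStr).getD r0 := by
  induction L generalizing r0 with
  | nil => rfl
  | cons hd tl ih =>
    rcases List.pairwise_cons.mp hs with ⟨hhd, htl⟩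
    rw [List.foldl_cons, List.flatMap_cons, pv_filterMap_const, pv_max?_replicate_append]
    cases hb : hd.2.any (fun w => PySem.Str.isIn w t)
    · have hk : hd.2.countP (fun w => PySem.Str.isIn w t) = 0 :=
        (pv_countP_zero_iff_any t hd.2).mpr hb
      simp only [Bool.false_eq_true, if_false, hk]
      exact ih r0 htl
    · have hk : hd.2.countP (fun w => PySem.Str.isIn w t) ≠ 0 := by
        intro h0
        rw [(pv_countP_zero_iff_any t hd.2).mp h0] at hb
        exact Bool.false_ne_true hb
      simp only [if_true, hk, if_false]
      rw [ih (PySem.Int.toStr hd.1) htl]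
      cases hmm : PySem.List.max? (tl.flatMap (fun p => p.2.filterMap
          (fun kw => if PySem.Str.isIn kw t then some p.1 else none))) (fun x => x) with
      | none =>
        have hnil : tl.flatMap (fun p => p.2.filterMap
            (fun kw => if PySem.Str.isIn kw t then some p.1 else none)) = [] :=
          (PySem.List.max?_eq_none_iff _ _).mp hmm
        rw [hnil, List.foldl_nil]
        rfl
      | some m =>
        cases hxt : tl.flatMap (fun p => p.2.filterMap
            (fun kw => if PySem.Str.isIn kw t then some p.1 else none)) with
        | nil =>
          rw [hxt] at hmm
          rw [show PySem.List.max? ([] : List Int) (fun x => x) = none from rfl] at hmm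
          simp at hmm
        | cons x t' =>
          rw [hxt] at hmm
          rw [PySem.List.max?_id_cons] at hmm
          have hm : m = t'.foldl max x := (Option.some_inj.mp hmm).symm
          have hmem : m ∈ tl.flatMap (fun p => p.2.filterMap
              (fun kw => if PySem.Str.isIn kw t then some p.1 else none)) := by
            rw [hxt, hm]
            rcases (PySem.List.foldl_max_mem t' x) with h | h
            · rw [h]; exact List.mem_cons_self ..
            · exact List.mem_cons_of_mem x h
          have hle : hd.1 ≤ m := by
            rcases pv_mem_cands t tl m hmem with ⟨q, hq, rfl⟩
            exact hhd q hq
          rw [List.foldl_cons]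
          rw [show List.foldl max (max hd.1 x) t' = max hd.1 (List.foldl max x t') from
            List.foldl_assoc]
          rw [← hm, max_eq_right hle]
          rfl

-- ---- B side: the nested scan loop is the max of its candidates ----

-- the inner 'for L in lengths' loop collects exactly the successful lookups
theorem pv_foldl_lookup (f : Int → Option Int) (xs : List Int) (b : Option Int) :
    xs.foldl
        (fun best L =>
          match f L with
          | none => best
          | some rid => some (match best with | none => rid | some m => max m rid)) b =
      (xs.filterMap f).foldl
        (fun best rid => some (match best with | none => rid | some m => max m rid)) b := by
  induction xs generalizing b with
  | nil => rfl
  | cons x xs ih =>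
    rw [List.foldl_cons, List.filterMap_cons]
    cases f x <;> simp only [ih, List.foldl_cons]

-- pointwise-equal step functions fold alike
theorem pv_foldl_ext {α β : Type} (f g : β → α → β) (xs : List α) (b : β)
    (h : ∀ b a, f b a = g b a) : xs.foldl f b = xs.foldl g b := by
  induction xs generalizing b with
  | nil => rfl
  | cons x xs ih => rw [List.foldl_cons, List.foldl_cons, h]; exact ih _

-- a foldl over a flatMap is the nested foldl
theorem pv_foldl_flatMap {α β γ : Type} (l : List α) (f : α → List β) (g : γ → β → γ) (b : γ) :
    (l.flatMap f).foldl g b = l.foldl (fun b a => (f a).foldl g b) b := by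
  induction l generalizing b with
  | nil => rfl
  | cons x xs ih => rw [List.flatMap_cons, List.foldl_append, List.foldl_cons, ih]

-- the running 'best' loop from a some-accumulator is a running max
theorem pv_foldl_best_some (xs : List Int) (m : Int) :
    xs.foldl (fun best rid => some (match best with | none => rid | some m => max m rid)) (some m) =
      some (xs.foldl max m) := by
  induction xs generalizing m with
  | nil => rfl
  | cons x xs ih => rw [List.foldl_cons, List.foldl_cons]; exact ih (max m x)

-- the running 'best' loop from None is Python's max-or-None
theorem pv_foldl_best (xs : List Int) :
    xs.foldl (fun best rid => some (match best with | none => rid | some m => max m rid)) none =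
      PySem.List.max? xs (fun x => x) := by
  cases xs with
  | nil => rfl
  | cons x xs =>
    rw [List.foldl_cons, PySem.List.max?_id_cons]
    exact pv_foldl_best_some xs x

-- ---- equality of the two maxima ----

theorem pv_max?_eq_of_dom (X Y : List Int)
    (h1 : ∀ x ∈ X, ∃ y ∈ Y, x ≤ y) (h2 : ∀ y ∈ Y, ∃ x ∈ X, y ≤ x) :
    PySem.List.max? X (fun x => x) = PySem.List.max? Y (fun x => x) := by
  cases hX : PySem.List.max? X (fun x => x) with
  | none =>
    cases hY : PySem.List.max? Y (fun x => x) with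
    | none => rfl
    | some mY =>
      have hXnil : X = [] := (PySem.List.max?_eq_none_iff _ _).mp hX
      rcases h2 mY (PySem.List.max?_mem hY) with ⟨x, hx, _⟩
      rw [hXnil] at hx
      exact absurd hx (List.not_mem_nil)
  | some mX =>
    cases hY : PySem.List.max? Y (fun x => x) with
    | none =>
      have hYnil : Y = [] := (PySem.List.max?_eq_none_iff _ _).mp hY
      rcases h1 mX (PySem.List.max?_mem hX) with ⟨y, hy, _⟩
      rw [hYnil] at hy
      exact absurd hy (List.not_mem_nil)
    | some mY =>
      rcases h1 mX (PySem.List.max?_mem hX) with ⟨y, hy, hxy⟩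
      rcases h2 mY (PySem.List.max?_mem hY) with ⟨x, hx, hyx⟩
      have h3 : y ≤ mY := PySem.List.max?_isMax hY y hy
      have h4 : x ≤ mX := PySem.List.max?_isMax hX x hx
      have : mX = mY := by omega
      rw [this]

-- facts about the literal inverted index, checked by computation
set_option maxRecDepth 100000 in
theorem pv_items_sound : ∀ q ∈ pvKw2Id.items, ∃ p ∈ pvItems, q.1 ∈ p.2 ∧ p.1 = q.2 := by decide

set_option maxRecDepth 100000 in
set_option maxHeartbeats 1600000 in
theorem pv_lookup_complete :
    ∀ p ∈ pvItems, ∀ kw ∈ p.2,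
      PySem.Dict.get? pvKw2Id kw = some (PySem.Dict.getD pvKw2Id kw 0) ∧
      p.1 ≤ PySem.Dict.getD pvKw2Id kw 0 ∧
      PySem.Str.len kw ∈ pvLengths ∧ kw.toList ≠ [] := by decide

set_option maxRecDepth 100000 in
theorem pv_lengths_pos : ∀ L ∈ pvLengths, 0 < L := by decide

-- every candidate B collects is matched (at value) by a candidate of A
theorem pv_dom1 (t : String) : ∀ x ∈ pvCandsB t, ∃ y ∈ pvCandsA t, x ≤ y := by
  intro x hx
  rcases List.mem_flatMap.mp hx with ⟨i, hi, hix⟩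
  rcases List.mem_filterMap.mp hix with ⟨L, hL, hget⟩
  have hiR := (PySem.List.mem_pyRange_one).mp hi
  have hLpos := pv_lengths_pos L hL
  set s := PySem.Str.slice t (some i) (some (i + L)) with hs
  -- s is a substring of t
  have hsub : PySem.Str.isIn s t = true := by
    have htl : s.toList = (t.toList.drop i.toNat).take ((i + L).toNat - i.toNat) := by
      rw [hs]
      simp only [PySem.Str.toList_slice, PySem.Chars.slice_eq_listSlice]
      exact PySem.List.slice_toNat t.toList (by omega) (by omega)
    have hpre : s.toList <+: t.toList.drop i.toNat := by
      rw [htl]; exact List.take_prefix _ _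
    have := (PySem.Chars.exists_prefix_drop_iff_isIn (sub := s.toList) (s := t.toList)).mp
      ⟨i.toNat, hpre⟩
    simpa [PySem.Str.isIn_eq] using this
  rcases pv_items_sound (s, x) (PySem.Dict.mem_items_of_get?_eq_some pvKw2Id hget) with ⟨p, hp, hkw, hval⟩
  refine ⟨p.1, ?_, le_of_eq hval.symm⟩
  exact List.mem_flatMap.mpr ⟨p, hp,
    List.mem_filterMap.mpr ⟨s, hkw, by rw [hsub]; rfl⟩⟩

-- every candidate A collects is dominated by a candidate of B
theorem pv_dom2 (t : String) : ∀ y ∈ pvCandsA t, ∃ x ∈ pvCandsB t, y ≤ x := by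
  intro y hy
  rcases List.mem_flatMap.mp hy with ⟨p, hp, hpy⟩
  rcases List.mem_filterMap.mp hpy with ⟨kw, hkw, hif⟩
  have hIn : PySem.Str.isIn kw t = true := by
    cases h : PySem.Str.isIn kw t
    · rw [h] at hif; simp at hif
    · rfl
  have hy1 : y = p.1 := by
    rw [hIn] at hif; exact (Option.some_inj.mp hif).symm
  rcases pv_lookup_complete p hp kw hkw with ⟨hget, hle, hlen, hne⟩
  -- find the position of kw in t
  have hinf : kw.toList <:+: t.toList := (PySem.Str.isIn_iff_infix _ _).mp hIn
  rcases List.infix_iff_prefix_suffix.mp hinf with ⟨u, hpre, hsuf⟩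
  rcases hsuf with ⟨w, hw⟩
  have hu : u = t.toList.drop w.length := by rw [← hw, List.drop_left]
  rw [hu] at hpre
  have hne' : t.toList.drop w.length ≠ [] := by
    intro h0
    rw [h0] at hpre
    exact hne (List.prefix_nil.mp hpre)
  have hjlt : w.length < t.toList.length := by
    by_contra h
    exact hne' (List.drop_eq_nil_of_le (by omega))
  -- the slice at that position is exactly kw
  have hlenkw : PySem.Str.len kw = (kw.toList.length : Int) := by
    simp [PySem.Str.len_eq]
  have hslice : PySem.Str.slice t (some (w.length : Int))
      (some ((w.length : Int) + PySem.Str.len kw)) = kw := by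
    apply String.toList_inj.mp
    rw [PySem.Str.toList_slice, PySem.Chars.slice_eq_listSlice, hlenkw,
      PySem.List.slice_natCast_add]
    exact ((List.prefix_iff_eq_take.mp hpre).symm)
  refine ⟨PySem.Dict.getD pvKw2Id kw 0, ?_, hy1 ▸ hle⟩
  refine List.mem_flatMap.mpr ⟨(w.length : Int), ?_, ?_⟩
  · refine (PySem.List.mem_pyRange_one).mpr ⟨by omega, ?_⟩
    simp only [PySem.Str.len_eq]
    exact_mod_cast hjlt
  · exact List.mem_filterMap.mpr ⟨PySem.Str.len kw, hlen, by rw [hslice]; exact hget⟩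

-- ===== VERDICT (by name: the statement is the Claim_ definition above) =====
set_option maxHeartbeats 1600000 in
set_option maxRecDepth 100000 in
theorem get_roster_id_spec : Claim_equal_get_roster_id := by
  intro text _
  unfold Spec_get_roster_id get_roster_id get_roster_id_alt
  set t := PySem.Str.strip (PySem.Str.lower text) with ht
  have hr : PySem.List.pyRange 1 11 1 = [1,2,3,4,5,6,7,8,9,10] := by decide
  have hg1 : (PySem.Dict.get? pvLookup 1).getD [] = ["eddie", "kirkland", "process", "trust"] := by rfl
  have hg2 : (PySem.Dict.get? pvLookup 2).getD [] = ["cory", "draper", "tampa", "badger"] := by rfl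
  have hg3 : (PySem.Dict.get? pvLookup 3).getD [] = ["will", "fortanbary", "essendon", "bombers"] := by rfl
  have hg4 : (PySem.Dict.get? pvLookup 4).getD [] = ["jeff", "herbst", "kickers", "qb"] := by rfl
  have hg5 : (PySem.Dict.get? pvLookup 5).getD [] = ["isaac", "wesley", "cleveland", "steamers"] := by rfl
  have hg6 : (PySem.Dict.get? pvLookup 6).getD [] = ["nick", "nicholas", "bazemore", "tech", "gtech", "ga"] := by rfl
  have hg7 : (PySem.Dict.get? pvLookup 7).getD [] = ["ryan", "atkinson", "rules", "sucks"] := by rfl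
  have hg8 : (PySem.Dict.get? pvLookup 8).getD [] = ["chris", "kirkland", "acworth", "eagles", "lame"] := by rfl
  have hg9 : (PySem.Dict.get? pvLookup 9).getD [] = ["alex", "aghoian", "beats", "ray"] := by rfl
  have hg10 : (PySem.Dict.get? pvLookup 10).getD [] = ["jeremy", "hess", "big", "home"] := by rfl
  -- A is the overwrite loop over pvItems
  have hA : (PySem.List.pyRange 1 11 1).foldl
      (fun roster n => pvInner t n ((PySem.Dict.get? pvLookup n).getD []) roster) "9" =
      pvItems.foldl (fun r p =>
        if p.2.any (fun w => PySem.Str.isIn w t) then PySem.Int.toStr p.1 else r) "9" := by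
    simp only [hr, pvItems, List.foldl_cons, List.foldl_nil, hg1, hg2, hg3, hg4, hg5,
      hg6, hg7, hg8, hg9, hg10, pvInner_eq]
  rw [hA, pv_last_eq_max t pvItems "9" (by decide)]
  -- B is the max of its candidate list
  have hB : (PySem.List.pyRange 0 (PySem.Str.len t) 1).foldl
      (fun best i =>
        pvLengths.foldl
          (fun best L =>
            match PySem.Dict.get? pvKw2Id (PySem.Str.slice t (some i) (some (i + L))) with
            | none => best
            | some rid => some (match best with | none => rid | some m => max m rid))
          best)
      none = PySem.List.max? (pvCandsB t) (fun x => x) := by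
    rw [← pv_foldl_best]
    unfold pvCandsB
    rw [pv_foldl_flatMap]
    exact pv_foldl_ext _ _ _ _ (fun b i => pv_foldl_lookup _ pvLengths b)
  rw [hB, pv_max?_eq_of_dom (pvCandsB t) (pvCandsA t) (pv_dom1 t) (pv_dom2 t)]
  show ((PySem.List.max? (pvCandsA t) _).map PySem.Int.toStr).getD "9" =
    PySem.Int.toStr ((PySem.List.max? (pvCandsA t) _).getD 9)
  cases PySem.List.max? (pvCandsA t) (fun x => x) with
  | none => rfl
  | some m => rfl
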